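-- pv_equiv track=rewrite | github.com/Cray-HPE/docs-csm | sls/inspect_nid_alloacations.py | get_nid_ranges
-- ===== SOURCE A (Python) =====
-- from itertools import groupby
-- from operator import itemgetter
--
-- def get_nid_ranges(nids):
--     '''
--     Create a nicely formated array of nid ranges
--     '''
--     ranges = []
--
--     for k, g in groupby( enumerate(nids), lambda x: x[1]-x[0]):
--         consecutive_nids = list(map(itemgetter(1), g))
--
--         if len(consecutive_nids) == 1:
--             ranges.append(str(consecutive_nids[0]))
--         else:
--             ranges.append("{}-{}".format(consecutive_nids[0], consecutive_nids[-1]))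
--
--     return ranges
-- ===== SOURCE B (Python) =====
-- def get_nid_ranges(nids):
--     '''
--     Create a nicely formated array of nid ranges
--     '''
--     ranges = []
--     started = False
--     first = last = 0
--     for v in nids:
--         if started and v == last + 1:
--             last = v
--         else:
--             if started:
--                 ranges.append(str(first) if first == last else "{}-{}".format(first, last))
--             first = last = v
--             started = True
--     if started:
--         ranges.append(str(first) if first == last else "{}-{}".format(first, last))
--     return ranges
-- ===== Notes on version B (the rewrite author's own statement) =====
-- stated objective: faster
-- what changed: Replaces the itertools.groupby-over-enumerate(value-index) pass that materialises each group as a list with a single forward scan that only tracks the current run's first and last value and flushes a run when the next value is not last+1.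
import Mathlib
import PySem

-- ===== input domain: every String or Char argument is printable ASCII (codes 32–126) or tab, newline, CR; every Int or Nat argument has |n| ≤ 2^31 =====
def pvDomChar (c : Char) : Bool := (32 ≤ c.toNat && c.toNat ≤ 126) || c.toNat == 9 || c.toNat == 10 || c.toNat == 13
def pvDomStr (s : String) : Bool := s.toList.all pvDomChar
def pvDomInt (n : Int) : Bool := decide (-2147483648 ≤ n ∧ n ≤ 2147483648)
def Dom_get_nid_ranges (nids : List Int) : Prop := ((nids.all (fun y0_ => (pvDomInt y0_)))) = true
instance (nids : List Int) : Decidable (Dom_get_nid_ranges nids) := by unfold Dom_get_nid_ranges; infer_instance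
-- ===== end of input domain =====

-- B replaces A's groupby-over-enumerate pass with a single scan tracking the current
-- run's first/last value; same O(n) cost, simpler decomposition. Return values only.

-- ===== PORT A =====
-- enumerate(nids) starting at index i
def pvEnumFrom (i : Int) : List Int → List (Int × Int)
  | [] => []
  | v :: vs => (i, v) :: pvEnumFrom (i + 1) vs

-- itertools.groupby(key = x[1]-x[0]): group consecutive pairs with equal key;
-- `cur` is the current group in reverse (k = its key)
def pvGroupby (k : Int) (cur : List (Int × Int)) : List (Int × Int) → List (List (Int × Int))
  | [] => [cur.reverse]
  | x :: xs =>
    if x.2 - x.1 = k then pvGroupby k (x :: cur) xs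
    else cur.reverse :: pvGroupby (x.2 - x.1) [x] xs

-- the loop body: consecutive_nids[0] / [-1] via pyGet?; the none branch is
-- unreachable because groupby's groups are nonempty
def pvFmtGroup (c : List Int) : String :=
  match PySem.List.pyGet? c 0, PySem.List.pyGet? c (-1) with
  | some a, some b =>
      if c.length = 1 then PySem.Int.toStr a
      else PySem.Int.toStr a ++ "-" ++ PySem.Int.toStr b
  | _, _ => ""

def get_nid_ranges (nids : List Int) : List String :=
  match pvEnumFrom 0 nids with
  | [] => []
  | x :: xs =>
    (pvGroupby (x.2 - x.1) [x] xs).map (fun g => pvFmtGroup (g.map Prod.snd))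

-- ===== PORT B =====
def pvFmtRun (first last : Int) : String :=
  if first = last then PySem.Int.toStr first
  else PySem.Int.toStr first ++ "-" ++ PySem.Int.toStr last

-- the scan after the first element has started a run (first, last)
def pvScan (first last : Int) : List Int → List String
  | [] => [pvFmtRun first last]
  | v :: vs =>
    if v = last + 1 then pvScan first v vs
    else pvFmtRun first last :: pvScan v v vs

def get_nid_ranges_alt (nids : List Int) : List String :=
  match nids with
  | [] => []
  | v :: vs => pvScan v v vs

-- ===== PRECONDITION & SPEC =====
def Spec_get_nid_ranges (nids : List Int) (out : List String) : Prop := out = get_nid_ranges_alt nids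
instance (nids : List Int) (out : List String) : Decidable (Spec_get_nid_ranges nids out) := by unfold Spec_get_nid_ranges; infer_instance

-- ===== CLAIM (what is proved, stated in full; the proofs are below) =====
def Claim_equal_get_nid_ranges : Prop := ∀ (nids : List Int), Dom_get_nid_ranges nids → Spec_get_nid_ranges nids (get_nid_ranges nids)

-- ===== LEMMAS AND PROOFS =====

-- A's formatting of a group whose value list runs from `first` to `last`
theorem pvFmtGroup_eq (c : List Int) (first last : Int)
    (hh : c.head? = some first) (hl : c.getLast? = some last)
    (h1 : c.length = 1 ↔ first = last) :
    pvFmtGroup c = pvFmtRun first last := by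
  cases c with
  | nil => simp at hh
  | cons a as =>
    simp only [List.head?_cons, Option.some.injEq] at hh
    subst hh
    simp only [pvFmtGroup, PySem.List.pyGet?_zero_cons, PySem.List.pyGet?_neg_one, hl,
      pvFmtRun]
    split_ifs with hlen heq heq
    · rfl
    · exact absurd (h1.mp hlen) heq
    · exact absurd (h1.mpr heq) hlen
    · rfl

-- the loop invariant: `cur.reverse` is the open group, its values run from
-- `first` to `last`, its key k satisfies k + i = last + 1 at next index i
theorem pvGroupby_eq_scan (vs : List Int) :
    ∀ (i k : Int) (cur : List (Int × Int)) (first last : Int),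
      (cur.reverse.map Prod.snd).head? = some first →
      (cur.reverse.map Prod.snd).getLast? = some last →
      ((cur.reverse.map Prod.snd).length = 1 ↔ first = last) →
      first ≤ last →
      k + i = last + 1 →
      (pvGroupby k cur (pvEnumFrom i vs)).map (fun g => pvFmtGroup (g.map Prod.snd))
        = pvScan first last vs := by
  induction vs with
  | nil =>
    intro i k cur first last hh hl h1 hle hk
    simp only [pvEnumFrom, pvGroupby, List.map_cons, List.map_nil, pvScan]
    rw [pvFmtGroup_eq _ first last hh hl h1]
  | cons v vs ih =>
    intro i k cur first last hh hl h1 hle hk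
    simp only [pvEnumFrom, pvGroupby, pvScan]
    have hcond : (v - i = k) ↔ (v = last + 1) := by omega
    by_cases hv : v = last + 1
    · rw [if_pos (hcond.mpr hv), if_pos hv]
      apply ih (i + 1) k ((i, v) :: cur) first v
      · cases hc : cur.reverse.map Prod.snd with
        | nil => simp [hc] at hh
        | cons a as =>
          simp only [List.reverse_cons, List.map_append]
          rw [hc] at hh ⊢
          simpa using hh
      · simp
      · constructor
        · intro hlen
          simp only [List.reverse_cons, List.map_append, List.length_append,
            List.map_cons, List.map_nil, List.length_cons, List.length_nil] at hlen
          have h0 : (cur.reverse.map Prod.snd).length = 0 := by omega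
          rw [List.length_eq_zero_iff] at h0
          simp [h0] at hh
        · intro heq
          exfalso
          omega
      · omega
      · omega
    · rw [if_neg (fun h => hv (hcond.mp h)), if_neg hv]
      rw [List.map_cons]
      rw [pvFmtGroup_eq _ first last hh hl h1]
      congr 1
      apply ih (i + 1) (v - i) [(i, v)] v v
      · simp
      · simp
      · simp
      · omega
      · omega

-- ===== VERDICT (by name: the statement is the Claim_ definition above) =====
theorem get_nid_ranges_spec : Claim_equal_get_nid_ranges := by
  intro nids _
  show get_nid_ranges nids = get_nid_ranges_alt nids
  cases nids with
  | nil => rfl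
  | cons v vs =>
    simp only [get_nid_ranges, get_nid_ranges_alt, pvEnumFrom]
    exact pvGroupby_eq_scan vs 1 (v - 0) [(0, v)] v v (by simp) (by simp) (by simp)
      le_rfl (by omega)
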